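-- pv_equiv track=rewrite | github.com/ChuckXavier/Jarvis- | v43/backtest_v43.py | _pick_top
-- ===== SOURCE A (Python) =====
-- TECH = {"QQQ","VUG","XLK"}
--
-- def _pick_top(scores, n):
--     ranked = sorted(scores.items(), key=lambda x:x[1], reverse=True)
--     picked = []; tc = 0
--     for t, _ in ranked:
--         if len(picked) >= n: break
--         if t in TECH and tc >= 2: continue  # Max 2 tech
--         picked.append(t)
--         if t in TECH: tc += 1
--     return picked
-- ===== SOURCE B (Python) =====
-- TECH = {"QQQ","VUG","XLK"}
--
-- def _pick_top(scores, n):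
--     ranked = sorted(scores.items(), key=lambda x: x[1], reverse=True)
--     tech_positions = [i for i, (t, _) in enumerate(ranked) if t in TECH]
--     banned = tech_positions[2:]
--     kept = [t for i, (t, _) in enumerate(ranked) if i not in banned]
--     return kept[:max(n, 0)]
-- ===== Notes on version B (the rewrite author's own statement) =====
-- stated objective: alternative
-- what changed: Replaces A's stateful pick-loop (counter plus break) by a stateless position-based selection: precompute the indices of tech tickers in the ranked order, ban all but the first two, keep every non-banned position, then truncate with a slice kept[:max(n,0)].
import Mathlib
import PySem

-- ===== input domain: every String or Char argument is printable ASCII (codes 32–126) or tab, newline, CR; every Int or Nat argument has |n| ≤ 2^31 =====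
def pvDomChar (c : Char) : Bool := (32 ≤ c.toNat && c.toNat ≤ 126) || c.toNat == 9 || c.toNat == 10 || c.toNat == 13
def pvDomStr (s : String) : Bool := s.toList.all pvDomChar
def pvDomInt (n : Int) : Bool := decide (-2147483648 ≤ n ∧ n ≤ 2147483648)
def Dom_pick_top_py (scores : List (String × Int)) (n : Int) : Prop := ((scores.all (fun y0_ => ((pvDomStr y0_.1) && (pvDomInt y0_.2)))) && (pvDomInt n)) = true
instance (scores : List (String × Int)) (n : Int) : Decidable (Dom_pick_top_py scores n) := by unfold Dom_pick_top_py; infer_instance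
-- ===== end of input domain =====

-- B replaces A's stateful counter/break loop by a stateless position-based selection
-- (ban all but the first two tech positions, keep the rest, then slice); same return value.

-- ===== PORT A =====
def TECH_py : List String := ["QQQ", "VUG", "XLK"]

-- the for-loop of A: break once len(picked) >= n, skip a tech ticker once tc >= 2
def pickLoopA : List (String × Int) → List String → Int → Int → List String
  | [], picked, _, _ => picked
  | (t, _) :: rest, picked, tc, n =>
    if n ≤ (picked.length : Int) then picked
    else if TECH_py.contains t = true ∧ 2 ≤ tc then pickLoopA rest picked tc n
    else pickLoopA rest (picked ++ [t]) (if TECH_py.contains t then tc + 1 else tc) n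

def pick_top_py (scores : List (String × Int)) (n : Int) : List String :=
  pickLoopA (PySem.List.sorted scores (fun x => x.2) true) [] 0 n

-- ===== PORT B =====
-- Source B: tech_positions (comprehension over enumerate), banned = tech_positions[2:],
-- kept (comprehension over enumerate with 'i not in banned'), return kept[:max(n, 0)]
def pick_top_py_alt (scores : List (String × Int)) (n : Int) : List String :=
  let ranked := PySem.List.sorted scores (fun x => x.2) true
  let tech_positions := (PySem.List.enumerate ranked 0).filterMap
      (fun p => if TECH_py.contains p.2.1 then some p.1 else none)
  let banned := PySem.List.slice tech_positions (some 2) none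
  let kept := (PySem.List.enumerate ranked 0).filterMap
      (fun p => if banned.contains p.1 then none else some p.2.1)
  PySem.List.slice kept none (some (max n 0))

-- ===== PRECONDITION & SPEC =====
def Spec_pick_top_py (scores : List (String × Int)) (n : Int) (out : List String) : Prop := out = pick_top_py_alt scores n
instance (scores : List (String × Int)) (n : Int) (out : List String) : Decidable (Spec_pick_top_py scores n out) := by unfold Spec_pick_top_py; infer_instance

-- ===== CLAIM (what is proved, stated in full; the proofs are below) =====
def Claim_equal_pick_top_py : Prop := ∀ (scores : List (String × Int)) (n : Int), Dom_pick_top_py scores n → Spec_pick_top_py scores n (pick_top_py scores n)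

-- ===== LEMMAS AND PROOFS =====

-- tech positions of the enumerated list (recursive view of B's first comprehension)
def posT : List (Int × (String × Int)) → List Int
  | [] => []
  | (i, (t, _)) :: es => if TECH_py.contains t then i :: posT es else posT es

-- recursive view of B's second comprehension: keep tickers whose position is not banned
def selB (B : List Int) : List (Int × (String × Int)) → List String
  | [] => []
  | (i, (t, _)) :: es => if B.contains i then selB B es else t :: selB B es

theorem posT_eq_filterMap (es : List (Int × (String × Int))) :
    es.filterMap (fun p => if TECH_py.contains p.2.1 then some p.1 else none) = posT es := by
  induction es with
  | nil => rfl
  | cons hd tl ih =>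
    obtain ⟨i, t, v⟩ := hd
    by_cases ht : t ∈ TECH_py
    · simp [posT, ht]
      simpa using ih
    · simp [posT, ht]
      simpa using ih

theorem selB_eq_filterMap (B : List Int) (es : List (Int × (String × Int))) :
    es.filterMap (fun p => if B.contains p.1 then none else some p.2.1) = selB B es := by
  induction es with
  | nil => rfl
  | cons hd tl ih =>
    obtain ⟨i, t, v⟩ := hd
    by_cases hb : i ∈ B
    · simp [selB, hb]
      simpa using ih
    · simp [selB, hb]
      simpa using ih

-- proof helper: the cap-filtered list with a tech counter (A's view)
def capF : List (String × Int) → Int → List String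
  | [], _ => []
  | (t, _) :: rest, tc =>
    if TECH_py.contains t then
      if tc < 2 then t :: capF rest (tc + 1) else capF rest tc
    else t :: capF rest tc

-- same list with remaining allowance counted down (bridge between the two views)
def capG : List (String × Int) → Nat → List String
  | [], _ => []
  | (t, _) :: rest, a =>
    if TECH_py.contains t then
      match a with
      | 0 => capG rest 0
      | a' + 1 => t :: capG rest a'
    else t :: capG rest a

theorem capG_eq_capF (l : List (String × Int)) (a : Nat) :
    capG l a = capF l (2 - (a : Int)) := by
  induction l generalizing a with
  | nil => rfl
  | cons hd tl ih =>
    obtain ⟨t, v⟩ := hd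
    by_cases ht : TECH_py.contains t = true
    · cases a with
      | zero =>
        simp only [capG, capF, ht, if_true, Nat.cast_zero, sub_zero]
        rw [if_neg (by omega : ¬ ((2:Int) < 2)), ih]
        norm_num
      | succ a' =>
        simp only [capG, capF, ht, if_true, Nat.cast_add, Nat.cast_one]
        rw [if_pos (by omega : (2:Int) - ((a' : Int) + 1) < 2),
          (by ring : (2:Int) - ((a' : Int) + 1) + 1 = 2 - (a' : Int)), ih]
    · simp only [capG, capF, ht, if_false, Bool.false_eq_true, ih]

theorem mem_posT_ge (l : List (String × Int)) (s i : Int)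
    (h : i ∈ posT (PySem.List.enumerate l s)) : s ≤ i := by
  induction l generalizing s with
  | nil => simp [posT, PySem.List.enumerate_nil] at h
  | cons hd tl ih =>
    obtain ⟨t, v⟩ := hd
    rw [PySem.List.enumerate_cons] at h
    by_cases ht : TECH_py.contains t = true
    · rw [posT, if_pos ht] at h
      rcases List.mem_cons.mp h with h' | h'
      · omega
      · have := ih (s + 1) h'; omega
    · rw [posT, if_neg ht] at h
      have := ih (s + 1) h; omega

-- a banned index below every index of the enumeration does not affect the selection
theorem selB_cons_lt (l : List (String × Int)) (s x : Int) (B : List Int) (hx : x < s) :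
    selB (x :: B) (PySem.List.enumerate l s) = selB B (PySem.List.enumerate l s) := by
  induction l generalizing s with
  | nil => simp [selB, PySem.List.enumerate_nil]
  | cons hd tl ih =>
    obtain ⟨t, v⟩ := hd
    rw [PySem.List.enumerate_cons]
    have hxs : ((x :: B).contains s) = (B.contains s) := by
      have hne : (s == x) = false := beq_eq_false_iff_ne.mpr (by omega : s ≠ x)
      rw [List.contains_cons, hne]
      simp
    rw [selB, selB, hxs]
    by_cases hb : B.contains s = true
    · rw [if_pos hb, if_pos hb]
      exact ih (s + 1) (by omega)
    · rw [if_neg hb, if_neg hb, ih (s + 1) (by omega)]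

theorem contains_drop_posT_false (l : List (String × Int)) (s : Int) (a : Nat) (x : Int)
    (hx : x < s) : ((posT (PySem.List.enumerate l s)).drop a).contains x = false := by
  by_contra h
  have hmem : x ∈ (posT (PySem.List.enumerate l s)).drop a :=
    List.contains_iff_mem.mp (Bool.not_eq_false _ |>.mp h)
  have := mem_posT_ge l s x (List.mem_of_mem_drop hmem)
  omega

-- MAIN: the position-banned selection equals the allowance-counted filter
theorem selB_posT (l : List (String × Int)) (s : Int) (a : Nat) :
    selB ((posT (PySem.List.enumerate l s)).drop a) (PySem.List.enumerate l s) = capG l a := by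
  induction l generalizing s a with
  | nil => simp [selB, capG, PySem.List.enumerate_nil]
  | cons hd tl ih =>
    obtain ⟨t, v⟩ := hd
    rw [PySem.List.enumerate_cons]
    by_cases ht : TECH_py.contains t = true
    · rw [show posT ((s, (t, v)) :: PySem.List.enumerate tl (s + 1)) =
          s :: posT (PySem.List.enumerate tl (s + 1)) by rw [posT, if_pos ht]]
      cases a with
      | zero =>
        rw [List.drop_zero, selB,
          if_pos (by rw [List.contains_cons]; simp : (s :: posT (PySem.List.enumerate tl (s + 1))).contains s = true),
          selB_cons_lt tl (s + 1) s _ (by omega)]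
        have h2 := ih (s + 1) 0
        rw [List.drop_zero] at h2
        rw [h2]
        simp [capG, List.contains_iff_mem.mp ht]
      | succ a' =>
        rw [List.drop_succ_cons, selB,
          if_neg (by rw [contains_drop_posT_false tl (s + 1) a' s (by omega)]; simp),
          ih (s + 1) a']
        simp [capG, List.contains_iff_mem.mp ht]
    · rw [show posT ((s, (t, v)) :: PySem.List.enumerate tl (s + 1)) =
          posT (PySem.List.enumerate tl (s + 1)) by rw [posT, if_neg ht]]
      rw [selB,
        if_neg (by rw [contains_drop_posT_false tl (s + 1) a s (by omega)]; simp),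
        ih (s + 1) a]
      simp [capG, show t ∉ TECH_py by simpa using ht]

-- A's loop in terms of capF (take after the fact)
theorem pickLoopA_capF (l : List (String × Int)) (picked : List String) (tc n : Int) :
    pickLoopA l picked tc n = picked ++ (capF l tc).take (n - picked.length).toNat := by
  induction l generalizing picked tc n with
  | nil => simp [pickLoopA, capF]
  | cons hd tl ih =>
    obtain ⟨t, v⟩ := hd
    simp only [pickLoopA, capF]
    by_cases h1 : n ≤ (picked.length : Int)
    · rw [if_pos h1]
      have h0 : (n - (picked.length : Int)).toNat = 0 := by omega
      rw [h0]
      simp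
    · rw [if_neg h1]
      have hlen : (n - ((picked ++ [t]).length : Int)).toNat = (n - picked.length - 1).toNat := by
        simp; omega
      have hpos : (n - (picked.length : Int)).toNat = (n - picked.length - 1).toNat + 1 := by omega
      by_cases ht : TECH_py.contains t = true
      · by_cases h2 : 2 ≤ tc
        · rw [if_pos ⟨ht, h2⟩, ih, if_pos ht, if_neg (by omega : ¬ tc < 2)]
        · rw [if_neg (fun h => h2 h.2), if_pos ht, ih, if_pos ht, hlen,
            if_pos (by omega : tc < 2), hpos, List.take_succ_cons, List.append_assoc]
          rfl
      · rw [if_neg (fun h => ht h.1), if_neg ht, ih, if_neg ht, hlen, hpos,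
          List.take_succ_cons, List.append_assoc]
        rfl

-- ===== VERDICT (by name: the statement is the Claim_ definition above) =====
theorem pick_top_py_spec : Claim_equal_pick_top_py := by
  intro scores n _
  unfold Spec_pick_top_py pick_top_py pick_top_py_alt
  set ranked := PySem.List.sorted scores (fun x => x.2) true with hr
  simp only [posT_eq_filterMap, selB_eq_filterMap]
  rw [show (2:Int) = ((2:Nat):Int) from rfl, PySem.List.slice_from_natCast,
    selB_posT ranked 0 2, capG_eq_capF, pickLoopA_capF]
  have hm : (max n 0 : Int) = (((max n 0).toNat : Nat) : Int) := by omega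
  rw [hm, PySem.List.slice_to_natCast]
  have harg : (2 : Int) - ((2 : Nat) : Int) = 0 := by norm_num
  rw [harg]
  have hln : (n - (([] : List String).length : Int)).toNat = (max n 0).toNat := by
    simp; omega
  rw [hln]
  simp
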